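-- pv_equiv track=rewrite | github.com/pypi-data/pypi-mirror-193 | packages/randomlib/randomlib-4.4.tar.gz/randomlib-4.4/randomlib/tokenizer/tokenize.py | word_tokenize_mr
-- ===== SOURCE A (Python) =====
-- def word_tokenize_mr(txt, punctuation):
--     """Internal function for Marathi word tokenization, not meant for programmer's usage
--
--     Args:
--         txt (str): An input text.
--         punctuation (bool): Decides whether to tokenize punctuation marks
--
--     Returns:
--         list: list of words.
--     """
--     punc = '''\\!()-[]{};:'",<>./?@#$%^&*_~'''
--     if punctuation:
--         string = ""
--         tokens = []
--         for ele in txt: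
--             if ele in punc:
--                 if string:
--                     tokens.append(string)
--                     string = ""
--                 tokens.append(ele)
--             elif ele == " ":
--                 if string:
--                     tokens.append(string)
--                     string = ""
--             else:
--                 string += ele
--         if string:
--             tokens.append(string)
--             string = ""
--         return tokens
--
--     for ele in txt:
--         if ele in punc:
--             txt = txt.replace(ele, " ")
--     result = txt.split()
--     return result
-- ===== SOURCE B (Python) =====
-- def word_tokenize_mr(txt, punctuation):
--     """Tokenize by translating the text once and splitting, instead of a char-by-char state machine."""
--     punc = set('''\\!()-[]{};:'",<>./?@#$%^&*_~''')
--     if punctuation: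
--         spaced = "".join(" " + ch + " " if ch in punc else ch for ch in txt)
--         return [tok for tok in spaced.split(" ") if tok]
--     translated = "".join(" " if ch in punc else ch for ch in txt)
--     return translated.split()
-- ===== Notes on version B (the rewrite author's own statement) =====
-- stated objective: idiomatic
-- what changed: Replaces A's char-by-char state machine (pending-word accumulator, and for the no-punctuation case a loop of whole-string replace() calls) by a single translate-then-split pass: each character is mapped once (punctuation wrapped in spaces, or turned into a space) and the result is split.
import Mathlib
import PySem

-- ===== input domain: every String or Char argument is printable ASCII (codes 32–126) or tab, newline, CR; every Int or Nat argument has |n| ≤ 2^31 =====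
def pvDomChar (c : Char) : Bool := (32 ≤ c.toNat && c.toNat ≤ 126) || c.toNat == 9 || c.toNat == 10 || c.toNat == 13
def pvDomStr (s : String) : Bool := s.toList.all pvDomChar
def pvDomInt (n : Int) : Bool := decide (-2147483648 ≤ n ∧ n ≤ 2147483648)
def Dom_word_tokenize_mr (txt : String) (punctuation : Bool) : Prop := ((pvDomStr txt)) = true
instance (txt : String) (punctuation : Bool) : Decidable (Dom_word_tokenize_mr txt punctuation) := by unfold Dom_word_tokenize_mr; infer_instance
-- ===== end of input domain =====

-- B translates the text in one pass (punctuation wrapped in spaces / turned into a space) and splits,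
-- instead of A's char-by-char state machine and replace() loop; objective: idiomatic.

def pvPunc : List Char := "\\!()-[]{};:'\",<>./?@#$%^&*_~".toList

-- ===== PORT A =====
-- A's punctuation=True loop: state = (pending string, tokens so far)
def pvStepA (st : List Char × List (List Char)) (ele : Char) : List Char × List (List Char) :=
  if pvPunc.contains ele then
    ([], (if st.1 ≠ [] then st.2 ++ [st.1] else st.2) ++ [[ele]])
  else if ele = ' ' then
    ([], if st.1 ≠ [] then st.2 ++ [st.1] else st.2)
  else
    (st.1 ++ [ele], st.2)

def word_tokenize_mr (txt : String) (punctuation : Bool) : List String :=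
  if punctuation then
    let r := txt.toList.foldl pvStepA ([], [])
    (if r.1 ≠ [] then r.2 ++ [r.1] else r.2).map String.ofList
  else
    -- 'for ele in txt: if ele in punc: txt = txt.replace(ele, " ")' then txt.split()
    let t := txt.toList.foldl
      (fun t ele => if pvPunc.contains ele then PySem.Chars.replace t [ele] [' '] else t)
      txt.toList
    (PySem.Chars.split₀ t).map String.ofList

-- ===== PORT B =====
def word_tokenize_mr_alt (txt : String) (punctuation : Bool) : List String :=
  if punctuation then
    let spaced := txt.toList.flatMap (fun ch => if pvPunc.contains ch then [' ', ch, ' '] else [ch])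
    ((List.splitOn ' ' spaced).filter (fun t => !t.isEmpty)).map String.ofList
  else
    let translated := txt.toList.map (fun ch => if pvPunc.contains ch then ' ' else ch)
    (PySem.Chars.split₀ translated).map String.ofList

-- ===== PRECONDITION & SPEC =====
def Spec_word_tokenize_mr (txt : String) (punctuation : Bool) (out : List String) : Prop := out = word_tokenize_mr_alt txt punctuation
instance (txt : String) (punctuation : Bool) (out : List String) : Decidable (Spec_word_tokenize_mr txt punctuation out) := by unfold Spec_word_tokenize_mr; infer_instance

-- ===== CLAIM (what is proved, stated in full; the proofs are below) =====
def Claim_equal_word_tokenize_mr : Prop := ∀ (txt : String) (punctuation : Bool), Dom_word_tokenize_mr txt punctuation → Spec_word_tokenize_mr txt punctuation (word_tokenize_mr txt punctuation)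

-- ===== LEMMAS AND PROOFS =====

theorem go_single (c d : Char) : ∀ (s : List Char) (fuel : Nat) (acc : List Char), s.length ≤ fuel →
    PySem.Chars.replace.go [c] [d] fuel s acc =
      acc.reverse ++ s.map (fun x => if x == c then d else x) := by
  intro s
  induction s with
  | nil =>
    intro fuel acc _
    cases fuel <;> simp [PySem.Chars.replace.go]
  | cons h t ih =>
    intro fuel acc hle
    cases fuel with
    | zero => simp at hle
    | succ n =>
      simp only [PySem.Chars.replace.go]
      by_cases hc : h = c
      · rw [if_pos]
        · rw [show ([d].reverse ++ acc) = d :: acc by simp,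
              show List.drop [c].length (h :: t) = t by simp]
          rw [ih n (d :: acc) (by simpa using Nat.le_of_succ_le_succ hle)]
          subst hc; simp
        · simp [List.isPrefixOf, hc]
      · rw [if_neg]
        · rw [ih n (h :: acc) (by simpa using Nat.le_of_succ_le_succ hle)]
          simp [hc]
        · simp [List.isPrefixOf]
          intro h'; exact hc h'.symm

theorem replace_single (s : List Char) (c d : Char) :
    PySem.Chars.replace s [c] [d] = s.map (fun x => if x == c then d else x) := by
  rw [PySem.Chars.replace]
  simp [go_single c d s s.length [] (le_refl _)]

theorem fold_replace (l : List Char) : ∀ (t : List Char),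
    l.foldl (fun t ele => if pvPunc.contains ele then PySem.Chars.replace t [ele] [' '] else t) t
      = t.map (fun x => if pvPunc.contains x && l.contains x then ' ' else x) := by
  induction l with
  | nil => intro t; simp
  | cons c rest ih =>
    intro t
    simp only [List.foldl_cons]
    by_cases hc : pvPunc.contains c
    · rw [if_pos hc, replace_single, ih, List.map_map]
      apply List.map_congr_left
      intro x _
      simp only [Function.comp]
      by_cases hx : x = c
      · subst hx
        have hm : x ∈ pvPunc := by simpa using hc
        simp [hm]
      · simp [hx]
    · rw [if_neg hc, ih]
      apply List.map_congr_left
      intro x _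
      by_cases hx : x = c
      · subst hx
        have hm : x ∉ pvPunc := by simpa using hc
        simp [hm]
      · simp [hx]

theorem pv_false_branch' (cs : List Char) :
    cs.foldl (fun t ele => if pvPunc.contains ele then PySem.Chars.replace t [ele] [' '] else t) cs =
    cs.map (fun ch => if pvPunc.contains ch then ' ' else ch) := by
  rw [fold_replace]
  apply List.map_congr_left
  intro x hx
  simp [hx]

theorem splitOnP_word_sep (m : List Char) : ∀ (s : List Char), (∀ c ∈ s, c ≠ ' ') →
    List.splitOnP (· == ' ') (s ++ ' ' :: m) = s :: List.splitOnP (· == ' ') m := by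
  intro s
  induction s with
  | nil => intro _; simp [List.splitOnP_cons]
  | cons h t ih =>
    intro hs
    have hh : ¬ (h == ' ') := by simpa using hs h (by simp)
    simp only [List.cons_append, List.splitOnP_cons, hh, Bool.false_eq_true, if_false]
    rw [ih (fun c hc => hs c (by simp [hc]))]
    simp

def pvF (l : List Char) : List (List Char) := (List.splitOn ' ' l).filter (fun t => !t.isEmpty)

theorem pvF_word_sep (s m : List Char) (hs : ∀ c ∈ s, c ≠ ' ') :
    pvF (s ++ ' ' :: m) = (if s = [] then [] else [s]) ++ pvF m := by
  unfold pvF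
  simp only [List.splitOn]
  rw [splitOnP_word_sep m s hs]
  by_cases h : s = [] <;> simp [h]

theorem pvF_word (s : List Char) (hs : ∀ c ∈ s, c ≠ ' ') :
    pvF s = (if s = [] then [] else [s]) := by
  unfold pvF
  simp only [List.splitOn]
  rw [List.splitOnP_eq_single _ _ (fun c hc => by simpa using hs c hc)]
  by_cases h : s = [] <;> simp [h]


theorem pv_main : ∀ (cs : List Char) (s : List Char) (toks : List (List Char)), (∀ c ∈ s, c ≠ ' ') →
    (if (cs.foldl pvStepA (s, toks)).1 ≠ [] then (cs.foldl pvStepA (s, toks)).2 ++ [(cs.foldl pvStepA (s, toks)).1] else (cs.foldl pvStepA (s, toks)).2)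
      = toks ++ pvF (s ++ cs.flatMap (fun ch => if pvPunc.contains ch then [' ', ch, ' '] else [ch])) := by
  intro cs
  induction cs with
  | nil =>
    intro s toks hs
    simp only [List.foldl_nil, List.flatMap_nil, List.append_nil]
    rw [pvF_word s hs]
    by_cases h : s = [] <;> simp [h]
  | cons c rest ih =>
    intro s toks hs
    simp only [List.foldl_cons, List.flatMap_cons]
    by_cases hc : pvPunc.contains c
    · have hm : c ∈ pvPunc := by simpa using hc
      have hcs : c ≠ ' ' := by intro h; subst h; revert hm; decide
      rw [show pvStepA (s, toks) c = ([], (if s = [] then toks else toks ++ [s]) ++ [[c]]) by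
            simp [pvStepA, hm]]
      rw [ih [] _ (by simp)]
      rw [if_pos hc]
      have e1 : s ++ ([' ', c, ' '] ++ rest.flatMap (fun ch => if pvPunc.contains ch then [' ', ch, ' '] else [ch]))
          = s ++ ' ' :: ([c] ++ ' ' :: rest.flatMap (fun ch => if pvPunc.contains ch then [' ', ch, ' '] else [ch])) := by simp
      rw [e1, pvF_word_sep s _ hs, pvF_word_sep [c] _ (by simpa using hcs)]
      by_cases h : s = [] <;> simp [h]
    · by_cases hsp : c = ' '
      · subst hsp
        rw [show pvStepA (s, toks) ' ' = ([], if s = [] then toks else toks ++ [s]) by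
              simp [pvStepA, (by simpa using hc : ' ' ∉ pvPunc)]]
        rw [ih [] _ (by simp)]
        rw [if_neg hc]
        have e1 : s ++ ([' '] ++ rest.flatMap (fun ch => if pvPunc.contains ch then [' ', ch, ' '] else [ch]))
            = s ++ ' ' :: rest.flatMap (fun ch => if pvPunc.contains ch then [' ', ch, ' '] else [ch]) := by simp
        rw [e1, pvF_word_sep s _ hs]
        by_cases h : s = [] <;> simp [h]
      · rw [show pvStepA (s, toks) c = (s ++ [c], toks) by
              simp [pvStepA, (by simpa using hc : c ∉ pvPunc), hsp]]
        have hs' : ∀ x ∈ s ++ [c], x ≠ ' ' := by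
          intro x hx
          rcases List.mem_append.mp hx with h | h
          · exact hs x h
          · rw [List.mem_singleton.mp h]; exact hsp
        rw [ih (s ++ [c]) _ hs']
        simp [(by simpa using hc : c ∉ pvPunc), List.append_assoc]

-- ===== VERDICT (by name: the statement is the Claim_ definition above) =====
theorem word_tokenize_mr_spec : Claim_equal_word_tokenize_mr := by
  intro txt p _
  unfold Spec_word_tokenize_mr word_tokenize_mr word_tokenize_mr_alt
  cases p
  · rw [if_neg (by simp), if_neg (by simp)]
    exact congrArg (fun l => (PySem.Chars.split₀ l).map String.ofList) (pv_false_branch' txt.toList)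
  · rw [if_pos rfl, if_pos rfl]
    have h := pv_main txt.toList [] [] (by simp)
    simp only [List.nil_append] at h
    exact congrArg (List.map String.ofList) h
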